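-- pv_equiv track=rewrite | github.com/Clarence-Liangxu/codeoptix | scripts/indent_to_braces.py | convert_with_braces
-- ===== SOURCE A (Python) =====
-- def get_indent_level(line):
--     return len(line) - len(line.lstrip(' '))
--
-- def convert_with_braces(lines):
--     result = []
--     indent_stack = [0]
--
--     for i, line in enumerate(lines):
--         stripped = line.rstrip()
--         curr_indent = get_indent_level(stripped)
--
--         if stripped.strip() == '':
--             result.append('')
--             continue
--
--         while curr_indent < indent_stack[-1]:
--             if result and result[-1].strip() == '':
--                 result.pop()
--             indent_stack.pop()
--             result.append(' ' * indent_stack[-1] + '}')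
--
--         if curr_indent > indent_stack[-1]:
--             result.append(' ' * indent_stack[-1] + '{')
--             indent_stack.append(curr_indent)
--
--         result.append(stripped)
--
--     while len(indent_stack) > 1:
--         if result and result[-1].strip() == '':
--             result.pop()
--         indent_stack.pop()
--         result.append(' ' * indent_stack[-1] + '}')
--
--     return result
-- ===== SOURCE B (Python) =====
-- def convert_with_braces(lines):
--     # Recursive-descent version: blocks are rendered by recursion on nesting
--     # (implicit call-stack) instead of an explicit indent stack.
--     items = [l.rstrip() for l in lines]
--     out = []
--
--     def close(level):
--         if out and out[-1].strip() == '':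
--             out.pop()
--         out.append(' ' * level + '}')
--
--     def go(i, level):
--         # render lines items[i:] belonging to the block whose indent is `level`;
--         # return the index of the first line that dedents below `level`.
--         while i < len(items):
--             s = items[i]
--             if s.strip() == '':
--                 out.append('')
--                 i += 1
--             else:
--                 ind = len(s) - len(s.lstrip(' '))
--                 if ind < level:
--                     break
--                 if ind > level:
--                     out.append(' ' * level + '{')
--                     out.append(s)
--                     i = go(i + 1, ind)
--                     close(level)
--                 else:
--                     out.append(s)
--                     i += 1
--         return i
--
--     go(0, 0)
--     return out
-- ===== Notes on version B (the rewrite author's own statement) =====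
-- stated objective: alternative
-- what changed: A walks the lines once with an explicit indent stack, pushing/popping levels; B first rstrips all lines and then renders nested blocks by recursive descent (the call stack replaces the indent stack), each recursive frame consuming its block's lines and emitting the enclosing '{'/'}' around the recursive call.
import Mathlib
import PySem

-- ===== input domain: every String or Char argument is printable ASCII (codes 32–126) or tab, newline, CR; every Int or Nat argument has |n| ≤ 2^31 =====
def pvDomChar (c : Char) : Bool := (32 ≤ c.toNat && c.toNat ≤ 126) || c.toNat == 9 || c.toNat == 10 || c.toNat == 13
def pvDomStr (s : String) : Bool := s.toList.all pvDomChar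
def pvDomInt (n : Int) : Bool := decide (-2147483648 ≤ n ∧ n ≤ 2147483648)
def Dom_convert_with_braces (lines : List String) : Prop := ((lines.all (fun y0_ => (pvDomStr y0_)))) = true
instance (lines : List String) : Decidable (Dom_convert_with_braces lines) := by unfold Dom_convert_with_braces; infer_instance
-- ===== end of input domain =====

-- B replaces A's explicit indent-stack loop by recursive descent over the nesting
-- structure (the call stack plays the role of the indent stack); same return value.

-- shared string primitives (exact ports of the Python expressions)
-- len(s) - len(s.lstrip(' ')): lstrip(' ') removes leading ' ' characters only
def get_indent_level (s : String) : Nat :=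
  s.toList.length - (s.toList.dropWhile (fun c => c == ' ')).length
def pvSpaces (n : Nat) : String := String.ofList (List.replicate n ' ')
-- s.strip() == ''
def pvIsBlank (s : String) : Bool := PySem.Str.strip s == ""
-- "if result and result[-1].strip() == '': result.pop()"
def pvPopBlank (res : List String) : List String :=
  match res.getLast? with
  | some l => if pvIsBlank l then res.dropLast else res
  | none => res

-- ===== PORT A =====
-- the inner "while curr_indent < indent_stack[-1]" loop (stack head = Python stack top)
def pvPopsA (curr : Nat) : List Nat → List String → List Nat × List String
  | top :: rest, res =>
    if curr < top then
      match rest with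
      | newtop :: rest' =>
          pvPopsA curr (newtop :: rest') (pvPopBlank res ++ [pvSpaces newtop ++ "}"])
      | [] => ([], res)  -- unreachable: the stack bottom 0 is never popped (curr : Nat)
    else (top :: rest, res)
  | [], res => ([], res)

-- one iteration of A's for-loop, on the already-rstripped line
def pvStepCore (st : List String × List Nat) (stripped : String) : List String × List Nat :=
  if pvIsBlank stripped then (st.1 ++ [""], st.2)
  else
    let curr := get_indent_level stripped
    let (stack1, res1) := pvPopsA curr st.2 st.1
    let (stack2, res2) :=
      if stack1.headD 0 < curr then
        (curr :: stack1, res1 ++ [pvSpaces (stack1.headD 0) ++ "{"])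
      else (stack1, res1)
    (res2 ++ [stripped], stack2)

-- the final "while len(indent_stack) > 1" flush
def pvFlushA : List Nat → List String → List String
  | _ :: newtop :: rest, res =>
      pvFlushA (newtop :: rest) (pvPopBlank res ++ [pvSpaces newtop ++ "}"])
  | _, res => res

def convert_with_braces (lines : List String) : List String :=
  let (res, stack) := lines.foldl (fun st line => pvStepCore st (PySem.Str.rstrip line)) ([], [0])
  pvFlushA stack res

-- ===== PORT B =====
-- close(level)
def pvCloseB (level : Nat) (out : List String) : List String :=
  pvPopBlank out ++ [pvSpaces level ++ "}"]

-- go(i, level): returns (out, remaining lines); the subtype bound on the remaining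
-- lines only serves termination (remaining ≤ consumed-from list)
def pvGoB : (items : List String) → Nat → List String → List String × {r : List String // r.length ≤ items.length}
  | [], _, out => (out, ⟨[], Nat.le_refl _⟩)
  | s :: rest, level, out =>
    if pvIsBlank s then
      let r := pvGoB rest level (out ++ [""])
      (r.1, ⟨r.2.val, Nat.le_trans r.2.property (Nat.le_succ _)⟩)
    else
      let ind := get_indent_level s
      if ind < level then (out, ⟨s :: rest, Nat.le_refl _⟩)
      else if level < ind then
        let r1 := pvGoB rest ind (out ++ [pvSpaces level ++ "{", s])
        let r2 := pvGoB r1.2.val level (pvCloseB level r1.1)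
        (r2.1, ⟨r2.2.val, Nat.le_trans r2.2.property (Nat.le_trans r1.2.property (Nat.le_succ _))⟩)
      else
        let r := pvGoB rest level (out ++ [s])
        (r.1, ⟨r.2.val, Nat.le_trans r.2.property (Nat.le_succ _)⟩)
termination_by items _ _ => items.length
decreasing_by
  · simp
  · simp
  · exact Nat.lt_succ_of_le r1.2.property
  · simp

def convert_with_braces_alt (lines : List String) : List String :=
  (pvGoB (lines.map PySem.Str.rstrip) 0 []).1

-- ===== PRECONDITION & SPEC =====
def Spec_convert_with_braces (lines : List String) (out : List String) : Prop := out = convert_with_braces_alt lines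
instance (lines : List String) (out : List String) : Decidable (Spec_convert_with_braces lines out) := by unfold Spec_convert_with_braces; infer_instance

-- ===== CLAIM (what is proved, stated in full; the proofs are below) =====
def Claim_equal_convert_with_braces : Prop := ∀ (lines : List String), Dom_convert_with_braces lines → Spec_convert_with_braces lines (convert_with_braces lines)

-- ===== LEMMAS AND PROOFS =====

-- A's whole remaining computation from an intermediate state (fold the rest, then flush)
def pvProcA (items : List String) (res : List String) (stack : List Nat) : List String :=
  let (r, s) := items.foldl pvStepCore (res, stack)
  pvFlushA s r

theorem pvProcA_nil (res : List String) (stack : List Nat) :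
    pvProcA [] res stack = pvFlushA stack res := rfl

theorem pvProcA_cons (s : String) (items res : List String) (stack : List Nat) :
    pvProcA (s :: items) res stack =
      pvProcA items (pvStepCore (res, stack) s).1 (pvStepCore (res, stack) s).2 := by
  simp [pvProcA, List.foldl_cons]


theorem pvPopsA_ge (curr top : Nat) (rest : List Nat) (res : List String)
    (h : ¬ curr < top) : pvPopsA curr (top :: rest) res = (top :: rest, res) := by
  rw [pvPopsA.eq_def]
  simp [h]

theorem pvPopsA_lt (curr top n : Nat) (rest : List Nat) (res : List String)
    (h : curr < top) : pvPopsA curr (top :: n :: rest) res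
      = pvPopsA curr (n :: rest) (pvPopBlank res ++ [pvSpaces n ++ "}"]) := by
  rw [pvPopsA.eq_def]
  simp [h]

-- the heart: A's processing of a frame equals B's recursive frame plus the caller's close
theorem pvMain : ∀ (N : Nat) (items : List String) (level : Nat) (stack : List Nat)
    (res : List String), items.length ≤ N → (stack = [] → level = 0) →
    pvProcA items res (level :: stack) =
      (match stack with
       | [] => (pvGoB items level res).1
       | n :: stack' =>
           pvProcA (pvGoB items level res).2.val
             (pvCloseB n (pvGoB items level res).1) (n :: stack')) := by
  intro N
  induction N with
  | zero =>
    intro items level stack res hlen hst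
    have hi : items = [] := by cases items <;> simp_all
    subst hi
    cases stack <;> simp [pvProcA_nil, pvFlushA, pvGoB, pvCloseB]
  | succ N ih =>
    intro items level stack res hlen hst
    cases items with
    | nil => cases stack <;> simp [pvProcA_nil, pvFlushA, pvGoB, pvCloseB]
    | cons s rest =>
      have hlen' : rest.length ≤ N := by simpa using hlen
      by_cases hb : pvIsBlank s
      · -- blank line: both append "" and continue
        have hstep : pvStepCore (res, level :: stack) s = (res ++ [""], level :: stack) := by
          simp [pvStepCore, hb]
        rw [pvProcA_cons, hstep]
        have := ih rest level stack (res ++ [""]) hlen' hst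
        simpa [pvGoB, hb] using this
      · rcases Nat.lt_trichotomy (get_indent_level s) level with hlt | heq | hgt
        · -- dedent below the frame: frame returns, caller closes and re-examines s
          rcases stack with _ | ⟨n, stack'⟩
          · exact absurd (hst rfl ▸ hlt) (Nat.not_lt_zero _)
          · have hstep : pvStepCore (res, level :: n :: stack') s
                = pvStepCore (pvCloseB n res, n :: stack') s := by
              simp [pvStepCore, hb, pvPopsA_lt _ _ _ _ _ hlt, pvCloseB]
            rw [pvProcA_cons, hstep, ← pvProcA_cons]
            simp [pvGoB, hb, hlt]
        · -- same indent: both append s and continue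
          subst heq
          have hstep : pvStepCore (res, get_indent_level s :: stack) s
              = (res ++ [s], get_indent_level s :: stack) := by
            simp [pvStepCore, hb, pvPopsA_ge]
          rw [pvProcA_cons, hstep]
          have := ih rest (get_indent_level s) stack (res ++ [s]) hlen' hst
          simpa [pvGoB, hb] using this
        · -- deeper indent: open a block; recurse, then close at the enclosing level
          have hstep : pvStepCore (res, level :: stack) s
              = (res ++ [pvSpaces level ++ "{", s], get_indent_level s :: level :: stack) := by
            simp [pvStepCore, hb, pvPopsA_ge _ _ _ _ (Nat.not_lt.mpr (Nat.le_of_lt hgt)), hgt]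
          rw [pvProcA_cons, hstep]
          have ih1 : pvProcA rest (res ++ [pvSpaces level ++ "{", s])
              (get_indent_level s :: level :: stack)
            = pvProcA (pvGoB rest (get_indent_level s) (res ++ [pvSpaces level ++ "{", s])).2.val
                (pvCloseB level (pvGoB rest (get_indent_level s) (res ++ [pvSpaces level ++ "{", s])).1)
                (level :: stack) :=
            ih rest (get_indent_level s) (level :: stack)
              (res ++ [pvSpaces level ++ "{", s]) hlen' (by simp)
          rw [ih1]
          have hlen2 : (pvGoB rest (get_indent_level s) (res ++ [pvSpaces level ++ "{", s])).2.val.length ≤ N :=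
            Nat.le_trans (pvGoB rest (get_indent_level s) (res ++ [pvSpaces level ++ "{", s])).2.property hlen'
          have ih2 := ih (pvGoB rest (get_indent_level s) (res ++ [pvSpaces level ++ "{", s])).2.val
            level stack (pvCloseB level (pvGoB rest (get_indent_level s) (res ++ [pvSpaces level ++ "{", s])).1)
            hlen2 hst
          rw [ih2]
          simp [pvGoB, hb, Nat.not_lt.mpr (Nat.le_of_lt hgt), hgt]

-- ===== VERDICT (by name: the statement is the Claim_ definition above) =====
theorem convert_with_braces_spec : Claim_equal_convert_with_braces := by
  intro lines _
  have h0 : convert_with_braces lines = pvProcA (lines.map PySem.Str.rstrip) [] [0] := by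
    simp [convert_with_braces, pvProcA, List.foldl_map]
  have h := pvMain (lines.map PySem.Str.rstrip).length (lines.map PySem.Str.rstrip)
    0 [] [] (Nat.le_refl _) (fun _ => rfl)
  unfold Spec_convert_with_braces convert_with_braces_alt
  rw [h0, h]
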